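-- pv_equiv track=rewrite | github.com/eliotl/rg_poetry | src/phonetics/corpus_parse.py | sent_to_graf
-- ===== SOURCE A (Python) =====
-- def sent_to_graf(sent_index, grafMap):
-- 	mod = sent_index + 1
-- 	idx = 0
-- 	while idx < len(grafMap):
-- 		if grafMap[idx] >= mod:
-- 			break
-- 		idx = idx + 1
-- 	i1 = idx
-- 	i2 = max(0,mod - grafMap[idx-1] - 1)
-- 	return [i1, i2]
-- ===== SOURCE B (Python) =====
-- def sent_to_graf(sent_index, grafMap):
--     mod = sent_index + 1
--
--     def first_reaching(lo, hi):
--         # first index in [lo, hi) whose value is >= mod, else hi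
--         if hi - lo <= 1:
--             return lo if lo < hi and grafMap[lo] >= mod else hi
--         mid = (lo + hi) // 2
--         left = first_reaching(lo, mid)
--         return left if left < mid else first_reaching(mid, hi)
--
--     idx = first_reaching(0, len(grafMap))
--     return [idx, max(0, mod - grafMap[idx - 1] - 1)]
-- ===== Notes on version B (the rewrite author's own statement) =====
-- stated objective: alternative
-- what changed: B locates the first paragraph whose cumulative sentence count reaches the threshold by a recursive divide-and-conquer over index ranges (search the left half, fall through to the right half only when the left has no hit) instead of A's sequential while-loop; Pre_ excludes only the empty grafMap, on which A raises IndexError.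
import Mathlib
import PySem

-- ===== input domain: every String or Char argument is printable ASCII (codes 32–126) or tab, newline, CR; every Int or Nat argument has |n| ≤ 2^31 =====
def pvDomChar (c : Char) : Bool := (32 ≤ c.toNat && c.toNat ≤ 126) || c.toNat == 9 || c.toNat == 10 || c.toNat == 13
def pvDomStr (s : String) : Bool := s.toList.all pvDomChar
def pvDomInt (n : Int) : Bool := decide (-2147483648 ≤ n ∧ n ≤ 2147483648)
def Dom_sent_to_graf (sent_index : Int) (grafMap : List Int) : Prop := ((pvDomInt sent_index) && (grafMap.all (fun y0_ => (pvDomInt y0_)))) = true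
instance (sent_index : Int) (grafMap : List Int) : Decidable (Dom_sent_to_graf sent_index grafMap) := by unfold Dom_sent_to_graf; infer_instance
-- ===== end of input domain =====

-- B finds the first qualifying paragraph by divide-and-conquer over list halves instead of A's sequential index loop (alternative decomposition, same cost).

-- ===== PORT A =====
def sentToGrafLoopA (grafMap : List Int) (mod : Int) (idx : Nat) : Nat :=
  if idx < grafMap.length then
    if mod ≤ PySem.List.pyGetD grafMap (idx : Int) 0 then idx
    else sentToGrafLoopA grafMap mod (idx + 1)
  else idx
termination_by grafMap.length - idx

def sent_to_graf (sent_index : Int) (grafMap : List Int) : List Int :=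
  let mod := sent_index + 1
  let idx := sentToGrafLoopA grafMap mod 0
  [(idx : Int), max 0 (mod - PySem.List.pyGetD grafMap ((idx : Int) - 1) 0 - 1)]

-- ===== PORT B =====
-- termination measures for the divide-and-conquer, cited by name in decreasing_by
theorem firstReachB_dec_left (lo hi : Nat) (h : ¬ hi - lo ≤ 1) : (lo + hi) / 2 - lo < hi - lo := by omega
theorem firstReachB_dec_right (lo hi : Nat) (h : ¬ hi - lo ≤ 1) : hi - (lo + hi) / 2 < hi - lo := by omega

-- grafMap[lo] is read only under lo < hi ≤ len(grafMap), where pyGetD is exact.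
def firstReachB (grafMap : List Int) (mod : Int) (lo hi : Nat) : Nat :=
  if h : hi - lo ≤ 1 then
    if lo < hi ∧ mod ≤ PySem.List.pyGetD grafMap (lo : Int) 0 then lo else hi
  else
    let mid := (lo + hi) / 2
    let left := firstReachB grafMap mod lo mid
    if left < mid then left else firstReachB grafMap mod mid hi
termination_by hi - lo
decreasing_by
  · exact firstReachB_dec_left lo hi h
  · exact firstReachB_dec_right lo hi h

def sent_to_graf_alt (sent_index : Int) (grafMap : List Int) : List Int :=
  let mod := sent_index + 1
  let idx := firstReachB grafMap mod 0 grafMap.length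
  [(idx : Int), max 0 (mod - PySem.List.pyGetD grafMap ((idx : Int) - 1) 0 - 1)]

-- ===== PRECONDITION & SPEC =====
-- Pre_ excludes only the empty grafMap, on which the Python A raises IndexError (grafMap[-1]).
def Pre_sent_to_graf (sent_index : Int) (grafMap : List Int) : Prop := grafMap ≠ []
instance (sent_index : Int) (grafMap : List Int) : Decidable (Pre_sent_to_graf sent_index grafMap) := by unfold Pre_sent_to_graf; infer_instance
def pvWitness_sent_to_graf : Int × List Int := (3, [2, 5, 9])
def Spec_sent_to_graf (sent_index : Int) (grafMap : List Int) (out : List Int) : Prop := out = sent_to_graf_alt sent_index grafMap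
instance (sent_index : Int) (grafMap : List Int) (out : List Int) : Decidable (Spec_sent_to_graf sent_index grafMap out) := by unfold Spec_sent_to_graf; infer_instance

-- ===== CLAIM (what is proved, stated in full; the proofs are below) =====
def Claim_equal_sent_to_graf : Prop := ∀ (sent_index : Int) (grafMap : List Int), Dom_sent_to_graf sent_index grafMap → Pre_sent_to_graf sent_index grafMap → Spec_sent_to_graf sent_index grafMap (sent_to_graf sent_index grafMap)

-- ===== LEMMAS AND PROOFS =====

-- A's while-loop computes idx + findIdx on the rest of the list.
theorem loopA_eq_findIdx (grafMap : List Int) (mod : Int) (idx : Nat) :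
    sentToGrafLoopA grafMap mod idx =
      idx + (grafMap.drop idx).findIdx (fun v => mod ≤ v) := by
  by_cases h : idx < grafMap.length
  · have hdrop : grafMap.drop idx = grafMap[idx] :: grafMap.drop (idx + 1) :=
      List.drop_eq_getElem_cons h
    have hget : PySem.List.pyGetD grafMap (idx : Int) 0 = grafMap[idx] := by
      simp [PySem.List.pyGetD_natCast, List.getD_eq_getElem?_getD, h]
    rw [sentToGrafLoopA, hget, hdrop]
    by_cases hm : mod ≤ grafMap[idx]
    · rw [if_pos h, if_pos hm, List.findIdx_cons]
      simp [hm]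
    · rw [List.findIdx_cons]
      rw [loopA_eq_findIdx grafMap mod (idx + 1)]
      simp [h, hm]
      omega
  · rw [sentToGrafLoopA]
    simp [h, List.drop_eq_nil_of_le (by omega : grafMap.length ≤ idx)]
termination_by grafMap.length - idx

-- B's divide-and-conquer on [lo, hi) computes lo + findIdx on that window of the list.
theorem firstReachB_eq_findIdx (grafMap : List Int) (mod : Int) (lo hi : Nat)
    (h1 : lo ≤ hi) (h2 : hi ≤ grafMap.length) :
    firstReachB grafMap mod lo hi =
      lo + ((grafMap.drop lo).take (hi - lo)).findIdx (fun v => mod ≤ v) := by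
  rw [firstReachB]
  by_cases hb : hi - lo ≤ 1
  · rw [dif_pos hb]
    by_cases hlt : lo < hi
    · have hhi : hi = lo + 1 := by omega
      have hlo : lo < grafMap.length := by omega
      have hseg : (grafMap.drop lo).take (hi - lo) = [grafMap[lo]] := by
        rw [show hi - lo = 1 from by omega, List.drop_eq_getElem_cons hlo,
            List.take_succ_cons, List.take_zero]
      have hget : PySem.List.pyGetD grafMap (lo : Int) 0 = grafMap[lo] := by
        simp [PySem.List.pyGetD_natCast, List.getD_eq_getElem?_getD, hlo]
      rw [hseg, hget]
      by_cases hm : mod ≤ grafMap[lo]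
      · simp [hlt, hm, List.findIdx_cons]
      · simp [hm, List.findIdx_cons]
        omega
    · have hhi : hi = lo := by omega
      simp [hhi]
  · rw [dif_neg hb]
    have hmid1 : lo ≤ (lo + hi) / 2 := by omega
    have hmid2 : (lo + hi) / 2 ≤ hi := by omega
    simp only []
    rw [firstReachB_eq_findIdx grafMap mod lo ((lo + hi) / 2) hmid1 (by omega),
        firstReachB_eq_findIdx grafMap mod ((lo + hi) / 2) hi hmid2 h2]
    have hd : (grafMap.drop lo).drop ((lo + hi) / 2 - lo) = grafMap.drop ((lo + hi) / 2) := by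
      rw [List.drop_drop]
      congr 1
      omega
    have hsplit : (grafMap.drop lo).take (hi - lo) =
        (grafMap.drop lo).take ((lo + hi) / 2 - lo) ++
          (grafMap.drop ((lo + hi) / 2)).take (hi - (lo + hi) / 2) := by
      rw [show hi - lo = ((lo + hi) / 2 - lo) + (hi - (lo + hi) / 2) from by omega,
          List.take_add, hd]
    have hlenL : ((grafMap.drop lo).take ((lo + hi) / 2 - lo)).length =
        (lo + hi) / 2 - lo := by
      simp
      omega
    rw [hsplit, List.findIdx_append, hlenL]
    by_cases hC : ((grafMap.drop lo).take ((lo + hi) / 2 - lo)).findIdx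
        (fun v => mod ≤ v) < (lo + hi) / 2 - lo
    · rw [if_pos hC, if_pos (show lo + ((grafMap.drop lo).take ((lo + hi) / 2 - lo)).findIdx
          (fun v => mod ≤ v) < (lo + hi) / 2 from by omega)]
    · rw [if_neg hC, if_neg (show ¬ lo + ((grafMap.drop lo).take ((lo + hi) / 2 - lo)).findIdx
          (fun v => mod ≤ v) < (lo + hi) / 2 from by omega)]
      omega
termination_by hi - lo
decreasing_by all_goals omega

-- ===== VERDICT (by name: the statement is the Claim_ definition above) =====
theorem sent_to_graf_spec : Claim_equal_sent_to_graf := by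
  intro sent_index grafMap _ _
  simp only [Spec_sent_to_graf, sent_to_graf, sent_to_graf_alt]
  rw [loopA_eq_findIdx, firstReachB_eq_findIdx grafMap (sent_index + 1) 0 grafMap.length (Nat.zero_le _) le_rfl]
  simp
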